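-- pv_equiv track=rewrite | github.com/taabishm2/Proactive-FDH-RSA-Signature | proactive_scripts/pss.py | int_to_octet
-- ===== SOURCE A (Python) =====
-- def int_to_octet(val):
--
--     bval = bin(val)[2:]
--
--     l = len(bval)
--
--     if (l+8)%8 != 0: bval = '0'*(8-l%8) + bval
--
--     octet = ''
--
--     for i in range(0,len(bval),8):
--
--         o = hex(int(bval[i:i+8],2))[2:]
--
--         if len(o) < 2:
--
--             o = '0' + o
--
--         octet += o
--
--     return octet
-- ===== SOURCE B (Python) =====
-- def int_to_octet(val):
--     length = max(1, (val.bit_length() + 7) // 8)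
--     return val.to_bytes(length, 'big').hex()
-- ===== Notes on version B (the rewrite author's own statement) =====
-- stated objective: idiomatic
-- what changed: Replaces the binary-string construction, padding and 8-bit chunk loop with a direct byte-length computation plus int.to_bytes(...).hex(), so no binary string or per-chunk parsing/hex-padding is ever built.
-- outside the precondition, e.g. on int_to_octet(-38): A returns '26', B raises OverflowError
import Mathlib
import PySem

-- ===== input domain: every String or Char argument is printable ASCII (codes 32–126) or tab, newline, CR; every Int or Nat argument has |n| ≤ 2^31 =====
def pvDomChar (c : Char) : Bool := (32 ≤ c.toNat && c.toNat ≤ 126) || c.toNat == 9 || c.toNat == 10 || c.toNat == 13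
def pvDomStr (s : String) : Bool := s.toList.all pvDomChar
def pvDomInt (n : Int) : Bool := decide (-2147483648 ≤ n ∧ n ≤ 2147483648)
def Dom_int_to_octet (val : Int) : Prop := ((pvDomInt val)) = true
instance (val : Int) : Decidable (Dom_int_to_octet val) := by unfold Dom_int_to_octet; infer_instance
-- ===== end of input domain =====

-- B replaces A's binary-string build, padding and 8-bit chunk loop by computing the byte
-- length from the bit length and emitting each big-endian byte's two hex digits directly
-- (idiomatic int.to_bytes(...).hex()); equivalence proved for val ≥ 0 (A raises otherwise).

-- ===== PORT A =====
-- bin(n)[2:] for n > 0: binary digits, most significant first (exact; Nat.digitChar is '0'/'1' here)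
def binChars (n : Nat) : List Char :=
  if n = 0 then [] else binChars (n / 2) ++ [Nat.digitChar (n % 2)]
decreasing_by exact Nat.div_lt_self (by omega) (by omega)

-- int(s, 2) on a string of '0'/'1' characters (exact on such strings, the only ones A feeds it)
def parseBin (s : List Char) : Nat :=
  s.foldl (fun a c => 2 * a + (if c = '1' then 1 else 0)) 0

-- hex(n)[2:] digits for n > 0, lowercase, most significant first (exact)
def hexAux (n : Nat) : List Char :=
  if n = 0 then [] else hexAux (n / 16) ++ [Nat.digitChar (n % 16)]
decreasing_by exact Nat.div_lt_self (by omega) (by omega)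

-- hex(n)[2:] (hex(0)[2:] = "0")
def hexChars (n : Nat) : List Char := if n = 0 then ['0'] else hexAux n

-- the loop 'for i in range(0, len(bval), 8)' as structural recursion on the index;
-- bval[i:i+8] with i ≥ 0 is (bval.drop i).take 8 (exact for nonnegative bounds)
def chunkLoop (bval : List Char) (i : Nat) (octet : List Char) : List Char :=
  if i < bval.length then
    let o := hexChars (parseBin ((bval.drop i).take 8))
    let o := if o.length < 2 then '0' :: o else o
    chunkLoop bval (i + 8) (octet ++ o)
  else octet
termination_by bval.length - i
decreasing_by omega

def int_to_octet (val : Int) : String :=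
  -- bin(val)[2:]; under Pre_ val ≥ 0 so this is the binary of val.toNat ("0" for 0)
  let bval := if val.toNat = 0 then ['0'] else binChars val.toNat
  let l := bval.length
  let bval := if (l + 8) % 8 ≠ 0 then List.replicate (8 - l % 8) '0' ++ bval else bval
  String.ofList (chunkLoop bval 0 [])

-- ===== PORT B =====
-- val.bit_length()
def bitLength (n : Nat) : Nat :=
  if n = 0 then 0 else bitLength (n / 2) + 1
decreasing_by exact Nat.div_lt_self (by omega) (by omega)

-- one byte of bytes.hex(): two lowercase hex digits
def hex2 (b : Nat) : List Char := [Nat.digitChar (b / 16), Nat.digitChar (b % 16)]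

def int_to_octet_alt (val : Int) : String :=
  let n := val.toNat  -- under Pre_ val ≥ 0; to_bytes raises for negative val
  let length := max 1 ((bitLength n + 7) / 8)
  -- val.to_bytes(length, 'big').hex(): byte i (big-endian) is (n >> 8*(length-1-i)) & 0xff
  String.ofList (((List.range length).map (fun i => (n >>> (8 * (length - 1 - i))) % 256)).flatMap hex2)

-- ===== PRECONDITION & SPEC =====
-- Pre_ excludes negative val: there B (to_bytes) raises OverflowError while A raises ValueError,
-- except when |val|.bit_length() % 8 == 6, where the stripped '-0b' accidentally leaves a
-- parseable '0b' chunk and A returns the absolute value's hex — a value B cannot match by raising.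
def Pre_int_to_octet (val : Int) : Prop := 0 ≤ val
instance (val : Int) : Decidable (Pre_int_to_octet val) := by unfold Pre_int_to_octet; infer_instance
def pvWitness_int_to_octet : Int := (5)

def Spec_int_to_octet (val : Int) (out : String) : Prop := out = int_to_octet_alt val
instance (val : Int) (out : String) : Decidable (Spec_int_to_octet val out) := by unfold Spec_int_to_octet; infer_instance

-- ===== CLAIM (what is proved, stated in full; the proofs are below) =====
def Claim_equal_int_to_octet : Prop := ∀ (val : Int), Dom_int_to_octet val → Pre_int_to_octet val → Spec_int_to_octet val (int_to_octet val)

-- ===== LEMMAS AND PROOFS =====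

theorem binChars_length (n : Nat) : (binChars n).length = bitLength n := by
  induction n using Nat.strong_induction_on with
  | _ n ih =>
    rw [binChars, bitLength]
    by_cases h : n = 0
    · simp [h]
    · simp [h, ih (n / 2) (Nat.div_lt_self (by omega) (by omega))]

theorem parseBin_foldl (s : List Char) (a : Nat) :
    s.foldl (fun a c => 2 * a + (if c = '1' then 1 else 0)) a
      = a * 2 ^ s.length + parseBin s := by
  induction s generalizing a with
  | nil => simp [parseBin]
  | cons c t ih =>
    rw [List.foldl_cons, ih]
    have h2 : parseBin (c :: t) = (if c = '1' then 1 else 0) * 2 ^ t.length + parseBin t := by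
      show List.foldl _ (2 * 0 + (if c = '1' then 1 else 0)) t = _
      rw [ih]
      simp only [Nat.mul_zero, Nat.zero_add]
    rw [h2, List.length_cons]
    ring

theorem parseBin_append (s t : List Char) :
    parseBin (s ++ t) = parseBin s * 2 ^ t.length + parseBin t := by
  unfold parseBin
  rw [List.foldl_append, parseBin_foldl]
  rfl

theorem parseBin_binChars (n : Nat) : parseBin (binChars n) = n := by
  induction n using Nat.strong_induction_on with
  | _ n ih =>
    rw [binChars]
    by_cases h : n = 0
    · simp [h, parseBin]
    · rw [if_neg h, parseBin_append, ih (n / 2) (Nat.div_lt_self (by omega) (by omega))]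
      have h2 : n % 2 = 0 ∨ n % 2 = 1 := by omega
      rcases h2 with h2 | h2 <;> simp [h2, parseBin, Nat.digitChar] <;> omega

theorem parseBin_lt (s : List Char) : parseBin s < 2 ^ s.length := by
  induction s with
  | nil => simp [parseBin]
  | cons c t ih =>
    show List.foldl _ (2 * 0 + (if c = '1' then 1 else 0)) t < _
    rw [parseBin_foldl]
    have hd : (if c = '1' then 1 else 0) ≤ 1 := by split <;> omega
    have h2 : (2 : Nat) ^ (c :: t).length = 2 ^ t.length + 2 ^ t.length := by
      rw [List.length_cons, pow_succ]
      ring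
    rw [h2]
    have : (2 * 0 + if c = '1' then 1 else 0) * 2 ^ t.length ≤ 2 ^ t.length := by
      calc (2 * 0 + if c = '1' then 1 else 0) * 2 ^ t.length
          ≤ 1 * 2 ^ t.length := Nat.mul_le_mul_right _ (by omega)
        _ = 2 ^ t.length := Nat.one_mul _
    omega

theorem parseBin_replicate_zero (k : Nat) (s : List Char) :
    parseBin (List.replicate k '0' ++ s) = parseBin s := by
  rw [parseBin_append]
  have h0 : parseBin (List.replicate k '0') = 0 := by
    induction k with
    | zero => simp [parseBin]
    | succ k ih =>
      rw [List.replicate_succ]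
      show List.foldl _ (2 * 0 + (if '0' = '1' then 1 else 0)) _ = 0
      simpa [parseBin] using ih
  rw [h0, Nat.zero_mul, Nat.zero_add]

-- hex(m)[2:], zero-padded to length 2, equals the two hex digits of a byte
theorem hexPad_eq_hex2 (m : Nat) (hm : m < 256) :
    (if (hexChars m).length < 2 then '0' :: hexChars m else hexChars m) = hex2 m := by
  by_cases h16 : m < 16
  · have hd : m / 16 = 0 := by omega
    have hr : m % 16 = m := by omega
    by_cases h0 : m = 0
    · subst h0
      simp [hexChars, hex2, Nat.digitChar]
    · have h1 : hexChars m = [Nat.digitChar m] := by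
        rw [hexChars, if_neg h0, hexAux, if_neg h0, hexAux, hd, if_pos rfl, hr]
        simp
      simp [h1, hex2, hd, hr, Nat.digitChar]
  · have h0 : m ≠ 0 := by omega
    have hq0 : m / 16 ≠ 0 := by omega
    have hqq : m / 16 / 16 = 0 := by omega
    have hqr : m / 16 % 16 = m / 16 := by omega
    have h1 : hexChars m = [Nat.digitChar (m / 16), Nat.digitChar (m % 16)] := by
      rw [hexChars, if_neg h0, hexAux, if_neg h0, hexAux, if_neg hq0, hexAux, hqq,
        if_pos rfl, hqr]
      simp
    simp [h1, hex2]

theorem chunkLoop_acc (b : List Char) (i : Nat) (acc : List Char) :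
    chunkLoop b i acc = acc ++ chunkLoop b i [] := by
  generalize hk : b.length - i = k
  induction k using Nat.strong_induction_on generalizing i acc with
  | _ k ih =>
    by_cases h : i < b.length
    · rw [chunkLoop]
      conv_rhs => rw [chunkLoop]
      simp only [h, if_true, List.nil_append]
      have haux : ∀ x : List Char, chunkLoop b (i + 8) x = x ++ chunkLoop b (i + 8) [] :=
        fun x => ih (b.length - (i + 8)) (by omega) (i + 8) x rfl
      generalize (if (hexChars (parseBin (List.take 8 (List.drop i b)))).length < 2 then
          '0' :: hexChars (parseBin (List.take 8 (List.drop i b)))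
        else hexChars (parseBin (List.take 8 (List.drop i b)))) = o
      rw [haux (acc ++ o), haux o, List.append_assoc]
    · rw [chunkLoop]
      conv_rhs => rw [chunkLoop]
      simp [h]

theorem chunkLoop_shift (t r : List Char) (ht : t.length = 8) (j : Nat) (acc : List Char) :
    chunkLoop (t ++ r) (8 + j) acc = chunkLoop r j acc := by
  generalize hk : r.length - j = k
  induction k using Nat.strong_induction_on generalizing j acc with
  | _ k ih =>
    have hlen : (t ++ r).length = 8 + r.length := by simp [ht]
    have h8 : (t ++ r).drop 8 = r := by rw [← ht, List.drop_left]
    have hdrop : (t ++ r).drop (8 + j) = r.drop j := by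
      calc (t ++ r).drop (8 + j) = ((t ++ r).drop 8).drop j := by
            rw [List.drop_drop]
            try congr 1
            try omega
        _ = r.drop j := by rw [h8]
    by_cases h : j < r.length
    · rw [chunkLoop]
      conv_rhs => rw [chunkLoop]
      simp only [hlen, show 8 + j < 8 + r.length by omega, h, if_true, hdrop]
      rw [show 8 + j + 8 = 8 + (j + 8) by omega]
      exact ih (r.length - (j + 8)) (by omega) (j + 8) _ rfl
    · rw [chunkLoop]
      conv_rhs => rw [chunkLoop]
      simp [hlen, h, show ¬ 8 + j < 8 + r.length by omega]

theorem chunkLoop_shift0 (t r : List Char) (ht : t.length = 8) (acc : List Char) :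
    chunkLoop (t ++ r) 8 acc = chunkLoop r 0 acc := by
  simpa using chunkLoop_shift t r ht 0 acc

-- core: on a bit string of length 8*k, A's chunk loop emits the hex of the k big-endian bytes
theorem chunkLoop_bytes (k : Nat) (P : List Char) (hP : P.length = 8 * k) :
    chunkLoop P 0 [] =
      ((List.range k).map (fun i => (parseBin P >>> (8 * (k - 1 - i))) % 256)).flatMap hex2 := by
  induction k generalizing P with
  | zero =>
    rw [chunkLoop]
    simp only [Nat.mul_zero, List.length_eq_zero_iff] at hP
    simp [hP]
  | succ k ih =>
    have hPlen : P.length = 8 * k + 8 := by omega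
    have hts : P.take 8 ++ P.drop 8 = P := List.take_append_drop 8 P
    have ht : (P.take 8).length = 8 := by simp; omega
    have hr : (P.drop 8).length = 8 * k := by simp; omega
    have ha : parseBin (P.take 8) < 256 := by
      have h := parseBin_lt (P.take 8)
      rw [ht] at h
      exact h
    have hpr : parseBin (P.drop 8) < 2 ^ (8 * k) := by
      have h := parseBin_lt (P.drop 8)
      rw [hr] at h
      exact h
    have hn : parseBin P = parseBin (P.take 8) * 2 ^ (8 * k) + parseBin (P.drop 8) := by
      conv_lhs => rw [← hts]
      rw [parseBin_append, hr]
    -- unroll the first iteration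
    rw [chunkLoop]
    simp only [show 0 < P.length by omega, if_true, List.drop_zero, List.nil_append,
      Nat.zero_add]
    rw [chunkLoop_acc]
    conv_lhs => rw [← hts]
    rw [chunkLoop_shift0 _ _ ht, hts, ih (P.drop 8) hr]
    -- unroll the first byte on the right
    rw [List.range_succ_eq_map]
    simp only [List.map_cons, List.flatMap_cons, List.map_map]
    have hhead : (parseBin P >>> (8 * (k + 1 - 1 - 0))) % 256 = parseBin (P.take 8) := by
      simp only [Nat.sub_zero, Nat.add_sub_cancel]
      rw [hn, Nat.shiftRight_eq_div_pow, Nat.mul_comm (parseBin (List.take 8 P)),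
        Nat.mul_add_div (Nat.two_pow_pos _), Nat.div_eq_of_lt hpr, Nat.add_zero,
        Nat.mod_eq_of_lt ha]
    have htail : ∀ i ∈ List.range k,
        ((fun i => (parseBin P >>> (8 * (k + 1 - 1 - i))) % 256) ∘ Nat.succ) i
          = (parseBin (P.drop 8) >>> (8 * (k - 1 - i))) % 256 := by
      intro i hi
      rw [List.mem_range] at hi
      show (parseBin P >>> (8 * (k + 1 - 1 - (i + 1)))) % 256 = _
      have hj : k + 1 - 1 - (i + 1) = k - 1 - i := by omega
      rw [hj]
      have hjk : (k - 1 - i) + 1 ≤ k := by omega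
      rw [hn, Nat.shiftRight_eq_div_pow, Nat.shiftRight_eq_div_pow]
      have hsplit : parseBin (P.take 8) * 2 ^ (8 * k)
          = parseBin (P.take 8) * 2 ^ (8 * (k - (k - 1 - i))) * 2 ^ (8 * (k - 1 - i)) := by
        have he : 8 * (k - (k - 1 - i)) + 8 * (k - 1 - i) = 8 * k := by omega
        rw [mul_assoc, ← pow_add, he]
      rw [hsplit, Nat.mul_comm _ (2 ^ (8 * (k - 1 - i))),
        Nat.mul_add_div (Nat.two_pow_pos _)]
      obtain ⟨c, hc⟩ : (256 : Nat) ∣ parseBin (P.take 8) * 2 ^ (8 * (k - (k - 1 - i))) := by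
        have h256 : (256 : Nat) = 2 ^ 8 := by norm_num
        rw [h256]
        exact Dvd.dvd.mul_left (pow_dvd_pow 2 (by omega)) _
      rw [hc, Nat.add_comm, Nat.add_mul_mod_self_left]
    rw [hhead, List.map_congr_left htail]
    congr 1
    exact hexPad_eq_hex2 _ ha

-- ===== VERDICT (by name: the statement is the Claim_ definition above) =====
theorem int_to_octet_spec : Claim_equal_int_to_octet := by
  intro val _ _
  show int_to_octet val = int_to_octet_alt val
  set n := val.toNat with hn
  set bval0 : List Char := if n = 0 then ['0'] else binChars n with hbval0
  set L : Nat := bval0.length with hL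
  set P : List Char := if (L + 8) % 8 ≠ 0 then List.replicate (8 - L % 8) '0' ++ bval0 else bval0
    with hPdef
  set len : Nat := max 1 ((bitLength n + 7) / 8) with hlen
  have hA : int_to_octet val = String.ofList (chunkLoop P 0 []) := rfl
  have hB : int_to_octet_alt val =
      String.ofList (((List.range len).map
        (fun i => (n >>> (8 * (len - 1 - i))) % 256)).flatMap hex2) := rfl
  have hparse0 : parseBin bval0 = n := by
    rw [hbval0]
    by_cases h : n = 0
    · simp [h, parseBin]
    · rw [if_neg h]
      exact parseBin_binChars n
  have hL0 : L = max 1 (bitLength n) := by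
    rw [hL, hbval0]
    by_cases h : n = 0
    · rw [if_pos h, h, bitLength]
      simp
    · rw [if_neg h, binChars_length]
      have : bitLength n = bitLength (n / 2) + 1 := by rw [bitLength, if_neg h]
      omega
  have hPlen : P.length = 8 * len := by
    rcases Nat.eq_zero_or_pos (bitLength n) with hbz | hbz
    · have hn0 : n = 0 := by
        by_contra hne
        rw [bitLength, if_neg hne] at hbz
        omega
      have hb0 : bval0 = ['0'] := by rw [hbval0, if_pos hn0]
      have hL1 : L = 1 := by rw [hL, hb0]; rfl
      have hlen1 : len = 1 := by rw [hlen, hbz]; decide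
      rw [hPdef, hL1, hb0, hlen1]
      decide
    · have hLB : L = bitLength n := by rw [hL0]; omega
      have hlenL : len = (L + 7) / 8 := by rw [hlen, hLB]; omega
      rw [hPdef, hlenL]
      split_ifs with h
      · simp only [List.length_append, List.length_replicate, ← hL]
        omega
      · rw [← hL]
        omega
  have hparseP : parseBin P = n := by
    rw [hPdef]
    split_ifs with h
    · rw [parseBin_replicate_zero, hparse0]
    · exact hparse0
  rw [hA, hB, chunkLoop_bytes len P hPlen, hparseP]
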